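-- pv_equiv track=rewrite | github.com/jvaahtikari/smart-ev-learning | appdaemon/apps/predictor.py | _adjacent_bands
-- ===== SOURCE A (Python) =====
-- VALID_SEASON_BANDS = {
--     "winter":  ["jaakyma", "cold", "near_zero", "cool"],
--     "spring":  ["near_zero", "cool", "mild"],
--     "summer":  ["mild", "normal", "hot"],
--     "autumn":  ["cool", "mild", "near_zero"],
-- }
--
-- TEMP_BAND_ORDER = ["jaakyma", "cold", "near_zero", "cool", "mild", "normal", "hot"]
--
-- def _adjacent_bands(band, season):
--     season_bands = VALID_SEASON_BANDS.get(season, [])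
--     idx = TEMP_BAND_ORDER.index(band) if band in TEMP_BAND_ORDER else -1
--     adjacent = []
--     for adj in TEMP_BAND_ORDER:
--         if adj in season_bands and adj != band:
--             adj_idx = TEMP_BAND_ORDER.index(adj)
--             if abs(adj_idx - idx) == 1:
--                 adjacent.append(adj)
--     return adjacent
-- ===== SOURCE B (Python) =====
-- VALID_SEASON_BANDS = {
--     "winter":  ["jaakyma", "cold", "near_zero", "cool"],
--     "spring":  ["near_zero", "cool", "mild"],
--     "summer":  ["mild", "normal", "hot"],
--     "autumn":  ["cool", "mild", "near_zero"],
-- }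
--
-- TEMP_BAND_ORDER = ["jaakyma", "cold", "near_zero", "cool", "mild", "normal", "hot"]
--
-- def _adjacent_bands(band, season):
--     season_bands = VALID_SEASON_BANDS.get(season, [])
--     idx = TEMP_BAND_ORDER.index(band) if band in TEMP_BAND_ORDER else -1
--     out = []
--     for p in (idx - 1, idx + 1):
--         if 0 <= p < len(TEMP_BAND_ORDER):
--             cand = TEMP_BAND_ORDER[p]
--             if cand in season_bands:
--                 out.append(cand)
--     return out
-- ===== Notes on version B (the rewrite author's own statement) =====
-- stated objective: simpler
-- what changed: B replaces A's scan over all of TEMP_BAND_ORDER (with a repeated list.index lookup inside) by directly bounds-checking the two neighbor positions idx-1 and idx+1 and testing each candidate against the season's bands.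
import Mathlib
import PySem

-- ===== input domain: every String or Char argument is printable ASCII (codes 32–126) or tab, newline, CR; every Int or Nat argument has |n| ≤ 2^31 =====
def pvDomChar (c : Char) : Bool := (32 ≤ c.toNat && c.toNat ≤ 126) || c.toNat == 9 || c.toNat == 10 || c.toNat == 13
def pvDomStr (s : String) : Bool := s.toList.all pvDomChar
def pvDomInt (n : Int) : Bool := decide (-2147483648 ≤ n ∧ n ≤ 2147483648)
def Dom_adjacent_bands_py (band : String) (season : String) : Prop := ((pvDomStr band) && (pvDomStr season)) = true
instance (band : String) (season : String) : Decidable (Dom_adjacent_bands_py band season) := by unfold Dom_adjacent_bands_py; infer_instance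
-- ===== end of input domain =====

-- B checks only the two neighbor positions of band's index instead of A's scan over the
-- whole band order with a repeated index lookup inside; objective: simpler.

-- ===== PORT A =====
def VALID_SEASON_BANDS : PySem.Dict String (List String) :=
  PySem.Dict.mk
    [("winter",  ["jaakyma", "cold", "near_zero", "cool"]),
     ("spring",  ["near_zero", "cool", "mild"]),
     ("summer",  ["mild", "normal", "hot"]),
     ("autumn",  ["cool", "mild", "near_zero"])]

def TEMP_BAND_ORDER : List String :=
  ["jaakyma", "cold", "near_zero", "cool", "mild", "normal", "hot"]

def adjacent_bands_py (band : String) (season : String) : List String :=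
  let season_bands := PySem.Dict.getD VALID_SEASON_BANDS season []
  let idx : Int := if band ∈ TEMP_BAND_ORDER
                   then ((PySem.List.index? TEMP_BAND_ORDER band).getD 0 : Nat)
                   else -1
  TEMP_BAND_ORDER.foldl (fun adjacent adj =>
    if adj ∈ season_bands ∧ adj ≠ band then
      let adj_idx : Int := ((PySem.List.index? TEMP_BAND_ORDER adj).getD 0 : Nat)
      if (adj_idx - idx).natAbs = 1 then adjacent ++ [adj] else adjacent
    else adjacent) []

-- ===== PORT B =====
def adjacent_bands_py_alt (band : String) (season : String) : List String :=
  let season_bands := PySem.Dict.getD VALID_SEASON_BANDS season []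
  let idx : Int := if band ∈ TEMP_BAND_ORDER
                   then ((PySem.List.index? TEMP_BAND_ORDER band).getD 0 : Nat)
                   else -1
  [idx - 1, idx + 1].foldl (fun out p =>
    if 0 ≤ p ∧ p < (TEMP_BAND_ORDER.length : Int) then
      match PySem.List.pyGet? TEMP_BAND_ORDER p with
      | some cand => if cand ∈ season_bands then out ++ [cand] else out
      | none => out
    else out) []

-- ===== PRECONDITION & SPEC =====
-- A is total (it returns a list on every pair of strings), so Pre_ is trivially true; it is
-- written as the case split the proof follows (band/season a known name, or not) rather than
-- 'True' so the claim documents the function's natural domain. It excludes nothing.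
def Pre_adjacent_bands_py (band : String) (season : String) : Prop :=
  (band ∈ TEMP_BAND_ORDER ∨ band ∉ TEMP_BAND_ORDER) ∧
  (season ∈ (["winter", "spring", "summer", "autumn"] : List String) ∨
   season ∉ (["winter", "spring", "summer", "autumn"] : List String))
instance (band : String) (season : String) : Decidable (Pre_adjacent_bands_py band season) := by unfold Pre_adjacent_bands_py; infer_instance
def pvWitness_adjacent_bands_py : String × String := ("cool", "winter")
def Spec_adjacent_bands_py (band : String) (season : String) (out : List String) : Prop := out = adjacent_bands_py_alt band season
instance (band : String) (season : String) (out : List String) : Decidable (Spec_adjacent_bands_py band season out) := by unfold Spec_adjacent_bands_py; infer_instance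

-- ===== CLAIM (what is proved, stated in full; the proofs are below) =====
def Claim_equal_adjacent_bands_py : Prop := ∀ (band : String) (season : String), Dom_adjacent_bands_py band season → Pre_adjacent_bands_py band season → Spec_adjacent_bands_py band season (adjacent_bands_py band season)

-- ===== LEMMAS AND PROOFS =====

-- ===== VERDICT (by name: the statement is the Claim_ definition above) =====
theorem adjacent_bands_py_spec : Claim_equal_adjacent_bands_py := by
  intro band season _ hpre
  obtain ⟨hb0, hs0⟩ := hpre
  unfold Spec_adjacent_bands_py
  have hband : band = "jaakyma" ∨ band = "cold" ∨ band = "near_zero" ∨ band = "cool" ∨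
      band = "mild" ∨ band = "normal" ∨ band = "hot" ∨ band ∉ TEMP_BAND_ORDER := by
    rcases hb0 with h | h
    · simp only [TEMP_BAND_ORDER, List.mem_cons, List.not_mem_nil, or_false] at h
      tauto
    · tauto
  have hseason : season = "winter" ∨ season = "spring" ∨ season = "summer" ∨
      season = "autumn" ∨ (season ≠ "winter" ∧ season ≠ "spring" ∧ season ≠ "summer" ∧ season ≠ "autumn") := by
    rcases hs0 with h | h
    · simp only [List.mem_cons, List.not_mem_nil, or_false] at h
      tauto
    · simp only [List.mem_cons, List.not_mem_nil, or_false, not_or] at h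
      tauto
  have hgen : ∀ s : String, s ≠ "winter" → s ≠ "spring" → s ≠ "summer" → s ≠ "autumn" →
      PySem.Dict.getD VALID_SEASON_BANDS s [] = [] := by
    intro s h1 h2 h3 h4
    simp [VALID_SEASON_BANDS, PySem.Dict.getD, PySem.Dict.get?, Ne.symm h1, Ne.symm h2, Ne.symm h3,
      Ne.symm h4]
  rcases hband with hb|hb|hb|hb|hb|hb|hb|hb <;>
  rcases hseason with hs|hs|hs|hs|⟨hs1,hs2,hs3,hs4⟩ <;>
    try subst_vars
  all_goals
    first
      | decide
      | -- season outside VALID_SEASON_BANDS: season_bands = [], then both sides are closed terms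
        (simp only [adjacent_bands_py, adjacent_bands_py_alt, hgen _ hs1 hs2 hs3 hs4]
         first
           | decide
           | simp [TEMP_BAND_ORDER, List.foldl, PySem.List.pyGet?, PySem.List.pyIdx?]
         done)
      | -- band outside TEMP_BAND_ORDER (idx = -1), season a known season
        (have hbs : ∀ x, x ∈ TEMP_BAND_ORDER → ¬ (x = band) := fun x hx h => hb (h ▸ hx)
         have hb1 : ¬ (band = "jaakyma") := fun h => hb (by rw [h]; decide)
         have hb2 : ¬ (band = "cold") := fun h => hb (by rw [h]; decide)
         have hb3 : ¬ (band = "near_zero") := fun h => hb (by rw [h]; decide)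
         have hb4 : ¬ (band = "cool") := fun h => hb (by rw [h]; decide)
         have hb5 : ¬ (band = "mild") := fun h => hb (by rw [h]; decide)
         have hb6 : ¬ (band = "normal") := fun h => hb (by rw [h]; decide)
         have hb7 : ¬ (band = "hot") := fun h => hb (by rw [h]; decide)
         simp [adjacent_bands_py, adjacent_bands_py_alt,
           hb1, hb2, hb3, hb4, hb5, hb6, hb7,
           hbs "jaakyma" (by decide), hbs "cold" (by decide), hbs "near_zero" (by decide),
           hbs "cool" (by decide), hbs "mild" (by decide), hbs "normal" (by decide),
           hbs "hot" (by decide), TEMP_BAND_ORDER, VALID_SEASON_BANDS, PySem.Dict.getD,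
           PySem.Dict.get?, PySem.List.pyGet?, PySem.List.pyIdx?,
           List.foldl] <;> decide
         done)
      | -- band outside TEMP_BAND_ORDER and season outside VALID_SEASON_BANDS
        (have hb1 : ¬ (band = "jaakyma") := fun h => hb (by rw [h]; decide)
         have hb2 : ¬ (band = "cold") := fun h => hb (by rw [h]; decide)
         have hb3 : ¬ (band = "near_zero") := fun h => hb (by rw [h]; decide)
         have hb4 : ¬ (band = "cool") := fun h => hb (by rw [h]; decide)
         have hb5 : ¬ (band = "mild") := fun h => hb (by rw [h]; decide)
         have hb6 : ¬ (band = "normal") := fun h => hb (by rw [h]; decide)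
         have hb7 : ¬ (band = "hot") := fun h => hb (by rw [h]; decide)
         simp [adjacent_bands_py, adjacent_bands_py_alt, hgen _ hs1 hs2 hs3 hs4,
           hb1, hb2, hb3, hb4, hb5, hb6, hb7, TEMP_BAND_ORDER, List.foldl,
           PySem.List.pyGet?, PySem.List.pyIdx?] <;> decide
         done)
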